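-- pv_equiv track=rewrite | github.com/GDSC-Hanyang/Algorithm-1- | 박수호/Lv.1/67일차_프로그래머스_lv.2_거리두기 확인하기.py | isThereP
-- ===== SOURCE A (Python) =====
-- def isThereP(x, y, tmp):
--     # 위 왼 아래 오른
--     dx = [-1, 0, 1, 0]
--     dy = [0, -1, 0, 1]
--     for i in range(4):
--         tx = x + dx[i]
--         ty = y + dy[i]
--         if 0 <= tx < 5 and 0 <= ty < 5 and not tmp[tx][ty] == 'X':
--             if tmp[tx][ty] == 'P':
--                 return True
--             for i in range(4):
--                 sx = tx + dx[i]
--                 sy = ty + dy[i]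
--                 if 0 <= sx < 5 and 0 <= sy < 5 and not (sx == x and sy == y) and tmp[sx][sy] == 'P':
--                     return True
--     return False
-- ===== SOURCE B (Python) =====
-- def isThereP(x, y, tmp):
--     # Candidate-centric scan: walk the 12 cells at Manhattan distance 1..2 of
--     # (x, y); a 'P' at distance 1 counts directly, a 'P' at distance 2 counts
--     # iff some intermediate cell adjacent to both is inside the 5x5 board and
--     # not 'X'. Out-of-board cells read as 'X'.
--     def at(i, j):
--         if 0 <= i < 5 and 0 <= j < 5:
--             return tmp[i][j]
--         return 'X'
--     offsets = [(-2, 0), (-1, -1), (-1, 0), (-1, 1), (0, -2), (0, -1),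
--                (0, 1), (0, 2), (1, -1), (1, 0), (1, 1), (2, 0)]
--     for di, dj in offsets:
--         if at(x + di, y + dj) != 'P':
--             continue
--         if abs(di) + abs(dj) == 1:
--             return True
--         mids = [(x + di // 2, y + dj // 2)] if di == 0 or dj == 0 else [(x + di, y), (x, y + dj)]
--         if any(at(mi, mj) != 'X' for mi, mj in mids):
--             return True
--     return False
-- ===== Notes on version B (the rewrite author's own statement) =====
-- stated objective: alternative
-- what changed: Replaced the direction-centric nested neighbor loops (4 outer directions, each expanding 4 inner directions) by a candidate-centric single scan over the 12 cells of the Manhattan distance-1..2 diamond around (x,y), with the open-intermediate condition for distance-2 cells computed arithmetically from the offset (out-of-board reads as 'X').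
-- outside the precondition, e.g. on isThereP(0, 0, [['X', 'X'], ['X']]): A returns False, B raises IndexError; on isThereP(1, 0, [['P']]): A returns True, B returns True
import Mathlib
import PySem

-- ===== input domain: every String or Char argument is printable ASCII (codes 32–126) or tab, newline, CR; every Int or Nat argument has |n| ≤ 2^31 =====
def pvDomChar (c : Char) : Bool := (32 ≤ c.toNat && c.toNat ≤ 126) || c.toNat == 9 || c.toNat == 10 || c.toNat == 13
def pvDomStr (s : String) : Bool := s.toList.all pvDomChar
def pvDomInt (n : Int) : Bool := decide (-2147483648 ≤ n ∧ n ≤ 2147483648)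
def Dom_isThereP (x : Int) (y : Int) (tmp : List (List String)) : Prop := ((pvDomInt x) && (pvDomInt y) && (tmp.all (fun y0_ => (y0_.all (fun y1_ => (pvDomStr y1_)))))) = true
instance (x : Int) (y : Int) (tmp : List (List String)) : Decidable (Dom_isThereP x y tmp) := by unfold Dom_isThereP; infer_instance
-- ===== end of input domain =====

-- B replaces A's nested direction loops by one scan of the 12 distance-1..2 cells with an
-- arithmetic open-intermediate test (objective: alternative decomposition, same cost).

-- Total cell access tmp[i][j]; Python raises IndexError when the lookup is none, so such
-- inputs are excluded by Pre_ and the "" default is never seen inside Pre_.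
def pvCell (tmp : List (List String)) (i j : Int) : String :=
  ((PySem.List.pyGet? tmp i).bind (fun r => PySem.List.pyGet? r j)).getD ""

-- ===== PORT A =====
def isThereP (x : Int) (y : Int) (tmp : List (List String)) : Bool :=
  let dx : List Int := [-1, 0, 1, 0]
  let dy : List Int := [0, -1, 0, 1]
  (List.range 4).any (fun i =>
    let tx := x + dx.getD i 0
    let ty := y + dy.getD i 0
    decide (0 ≤ tx ∧ tx < 5 ∧ 0 ≤ ty ∧ ty < 5 ∧ pvCell tmp tx ty ≠ "X") &&
      (decide (pvCell tmp tx ty = "P") ||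
        (List.range 4).any (fun j =>
          let sx := tx + dx.getD j 0
          let sy := ty + dy.getD j 0
          decide (0 ≤ sx ∧ sx < 5 ∧ 0 ≤ sy ∧ sy < 5 ∧ ¬(sx = x ∧ sy = y) ∧
                  pvCell tmp sx sy = "P"))))

-- ===== PORT B =====
-- tmp[i][j] seen as 'X' outside the 5x5 board (Source B's `at`)
def pvAt (tmp : List (List String)) (i j : Int) : String :=
  if 0 ≤ i ∧ i < 5 ∧ 0 ≤ j ∧ j < 5 then pvCell tmp i j else "X"

def pvOffsets : List (Int × Int) :=
  [(-2,0),(-1,-1),(-1,0),(-1,1),(0,-2),(0,-1),(0,1),(0,2),(1,-1),(1,0),(1,1),(2,0)]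

def isThereP_alt (x : Int) (y : Int) (tmp : List (List String)) : Bool :=
  pvOffsets.any (fun p =>
    decide (pvAt tmp (x + p.1) (y + p.2) = "P") &&
      (decide (p.1.natAbs + p.2.natAbs = 1) ||
        (if p.1 = 0 ∨ p.2 = 0 then
            [(x + PySem.Int.floordiv p.1 2, y + PySem.Int.floordiv p.2 2)]
          else [(x + p.1, y), (x, y + p.2)]).any
          (fun m => decide (pvAt tmp m.1 m.2 ≠ "X"))))

-- ===== PRECONDITION & SPEC =====
-- Pre_ requires every cell of the distance-1..2 diamond around (x,y) that lies inside the
-- 5x5 board to exist in tmp: outside it Python A raises IndexError on the cells it reads;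
-- it also excludes some inputs where A still returns (early True before a missing cell, or
-- a missing diamond cell A never reads because a wall or bounds stop it) — on those B may
-- read the missing cell and raise, so they cannot be matched.
def Pre_isThereP (x : Int) (y : Int) (tmp : List (List String)) : Prop :=
  ∀ p ∈ ([(-2,0),(-1,-1),(-1,0),(-1,1),(0,-2),(0,-1),(0,1),(0,2),(1,-1),(1,0),(1,1),(2,0)] : List (Int × Int)),
    0 ≤ x + p.1 → x + p.1 < 5 → 0 ≤ y + p.2 → y + p.2 < 5 →
      ((PySem.List.pyGet? tmp (x + p.1)).bind (fun r => PySem.List.pyGet? r (y + p.2))).isSome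
instance (x : Int) (y : Int) (tmp : List (List String)) : Decidable (Pre_isThereP x y tmp) := by
  unfold Pre_isThereP; infer_instance

def pvWitness_isThereP : Int × Int × List (List String) :=
  (2, 2, [["O","O","O","O","O"],["O","O","O","O","O"],["O","O","O","O","O"],
          ["O","O","O","O","O"],["O","O","O","O","O"]])

def Spec_isThereP (x : Int) (y : Int) (tmp : List (List String)) (out : Bool) : Prop := out = isThereP_alt x y tmp
instance (x : Int) (y : Int) (tmp : List (List String)) (out : Bool) : Decidable (Spec_isThereP x y tmp out) := by unfold Spec_isThereP; infer_instance

-- ===== CLAIM (what is proved, stated in full; the proofs are below) =====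
def Claim_equal_isThereP : Prop := ∀ (x : Int) (y : Int) (tmp : List (List String)), Dom_isThereP x y tmp → Pre_isThereP x y tmp → Spec_isThereP x y tmp (isThereP x y tmp)

-- ===== LEMMAS AND PROOFS =====

theorem pvAt_eq_P (tmp : List (List String)) (i j : Int) :
    pvAt tmp i j = "P" ↔ (0 ≤ i ∧ i < 5 ∧ 0 ≤ j ∧ j < 5) ∧ pvCell tmp i j = "P" := by
  unfold pvAt; split <;> simp_all

theorem pvAt_ne_X (tmp : List (List String)) (i j : Int) :
    pvAt tmp i j ≠ "X" ↔ (0 ≤ i ∧ i < 5 ∧ 0 ≤ j ∧ j < 5) ∧ pvCell tmp i j ≠ "X" := by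
  unfold pvAt; split <;> simp_all

theorem isThereP_eq_alt (x : Int) (y : Int) (tmp : List (List String)) :
    isThereP x y tmp = isThereP_alt x y tmp := by
  rw [Bool.eq_iff_iff]
  unfold isThereP isThereP_alt pvOffsets
  simp only [show List.range 4 = [0,1,2,3] from rfl, List.any_cons, List.any_nil,
    List.getD_cons_zero, List.getD_cons_succ, Bool.or_eq_true, Bool.and_eq_true,
    decide_eq_true_eq, pvAt_eq_P, pvAt_ne_X]
  norm_num [PySem.Int.floordiv,
    show ((-2:Int).fdiv 2) = -1 from by decide, show ((2:Int).fdiv 2) = 1 from by decide,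
    show ((0:Int).fdiv 2) = 0 from by decide,
    show ∀ z:Int, z + -1 + -1 = z + -2 from fun z => by ring,
    show ∀ z:Int, z + 1 + 1 = z + 2 from fun z => by ring]
  have hPX : ∀ {s : String}, s = "P" → ¬ s = "X" := fun h => by subst h; decide
  constructor
  · rintro (⟨⟨g1,g2,g3,g4,gX⟩, hP | ⟨h1,h2,h3,h4,hP⟩ | ⟨h1,h2,h3,h4,hP⟩ | ⟨h1,h2,h3,h4,hP⟩⟩ | ⟨⟨g1,g2,g3,g4,gX⟩, hP | ⟨h1,h2,h3,h4,hP⟩ | ⟨h1,h2,h3,h4,hP⟩ | ⟨h1,h2,h3,h4,hP⟩⟩ | ⟨⟨g1,g2,g3,g4,gX⟩, hP | ⟨h1,h2,h3,h4,hP⟩ | ⟨h1,h2,h3,h4,hP⟩ | ⟨h1,h2,h3,h4,hP⟩⟩ | ⟨⟨g1,g2,g3,g4,gX⟩, hP | ⟨h1,h2,h3,h4,hP⟩ | ⟨h1,h2,h3,h4,hP⟩ | ⟨h1,h2,h3,h4,hP⟩⟩)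
    · exact Or.inr (Or.inr (Or.inl (⟨⟨g1,g2,g3,g4⟩,hP⟩)))
    · exact Or.inl (⟨⟨⟨h1,h2,h3,h4⟩,hP⟩,⟨⟨g1,g2,g3,g4⟩,gX⟩⟩)
    · exact Or.inr (Or.inl (⟨⟨⟨h1,h2,h3,h4⟩,hP⟩, Or.inl ⟨⟨g1,g2,g3,g4⟩,gX⟩⟩))
    · exact Or.inr (Or.inr (Or.inr (Or.inl (⟨⟨⟨h1,h2,h3,h4⟩,hP⟩, Or.inl ⟨⟨g1,g2,g3,g4⟩,gX⟩⟩))))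
    · exact Or.inr (Or.inr (Or.inr (Or.inr (Or.inr (Or.inl (⟨⟨g1,g2,g3,g4⟩,hP⟩))))))
    · exact Or.inr (Or.inl (⟨⟨⟨h1,h2,h3,h4⟩,hP⟩, Or.inr ⟨⟨g1,g2,g3,g4⟩,gX⟩⟩))
    · exact Or.inr (Or.inr (Or.inr (Or.inr (Or.inl (⟨⟨⟨h1,h2,h3,h4⟩,hP⟩, ⟨⟨g1,g2,g3,g4⟩,gX⟩⟩)))))
    · exact Or.inr (Or.inr (Or.inr (Or.inr (Or.inr (Or.inr (Or.inr (Or.inr (Or.inl (⟨⟨⟨h1,h2,h3,h4⟩,hP⟩, Or.inr ⟨⟨g1,g2,g3,g4⟩,gX⟩⟩)))))))))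
    · exact Or.inr (Or.inr (Or.inr (Or.inr (Or.inr (Or.inr (Or.inr (Or.inr (Or.inr (Or.inl (⟨⟨g1,g2,g3,g4⟩,hP⟩))))))))))
    · exact Or.inr (Or.inr (Or.inr (Or.inr (Or.inr (Or.inr (Or.inr (Or.inr (Or.inl (⟨⟨⟨h1,h2,h3,h4⟩,hP⟩, Or.inl ⟨⟨g1,g2,g3,g4⟩,gX⟩⟩)))))))))
    · exact Or.inr (Or.inr (Or.inr (Or.inr (Or.inr (Or.inr (Or.inr (Or.inr (Or.inr (Or.inr (Or.inr (⟨⟨⟨h1,h2,h3,h4⟩,hP⟩, ⟨⟨g1,g2,g3,g4⟩,gX⟩⟩)))))))))))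
    · exact Or.inr (Or.inr (Or.inr (Or.inr (Or.inr (Or.inr (Or.inr (Or.inr (Or.inr (Or.inr (Or.inl (⟨⟨⟨h1,h2,h3,h4⟩,hP⟩, Or.inl ⟨⟨g1,g2,g3,g4⟩,gX⟩⟩)))))))))))
    · exact Or.inr (Or.inr (Or.inr (Or.inr (Or.inr (Or.inr (Or.inl (⟨⟨g1,g2,g3,g4⟩,hP⟩)))))))
    · exact Or.inr (Or.inr (Or.inr (Or.inl (⟨⟨⟨h1,h2,h3,h4⟩,hP⟩, Or.inr ⟨⟨g1,g2,g3,g4⟩,gX⟩⟩))))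
    · exact Or.inr (Or.inr (Or.inr (Or.inr (Or.inr (Or.inr (Or.inr (Or.inr (Or.inr (Or.inr (Or.inl (⟨⟨⟨h1,h2,h3,h4⟩,hP⟩, Or.inr ⟨⟨g1,g2,g3,g4⟩,gX⟩⟩)))))))))))
    · exact Or.inr (Or.inr (Or.inr (Or.inr (Or.inr (Or.inr (Or.inr (Or.inl (⟨⟨⟨h1,h2,h3,h4⟩,hP⟩, ⟨⟨g1,g2,g3,g4⟩,gX⟩⟩))))))))
  · rintro (⟨⟨⟨t1,t2,t3,t4⟩,tP⟩,⟨⟨m1,m2,m3,m4⟩,mX⟩⟩ | ⟨⟨⟨t1,t2,t3,t4⟩,tP⟩, ⟨⟨m1,m2,m3,m4⟩,mX⟩ | ⟨⟨m1,m2,m3,m4⟩,mX⟩⟩ | ⟨⟨t1,t2,t3,t4⟩,tP⟩ | ⟨⟨⟨t1,t2,t3,t4⟩,tP⟩, ⟨⟨m1,m2,m3,m4⟩,mX⟩ | ⟨⟨m1,m2,m3,m4⟩,mX⟩⟩ | ⟨⟨⟨t1,t2,t3,t4⟩,tP⟩,⟨⟨m1,m2,m3,m4⟩,mX⟩⟩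 | ⟨⟨t1,t2,t3,t4⟩,tP⟩ | ⟨⟨t1,t2,t3,t4⟩,tP⟩ | ⟨⟨⟨t1,t2,t3,t4⟩,tP⟩,⟨⟨m1,m2,m3,m4⟩,mX⟩⟩ | ⟨⟨⟨t1,t2,t3,t4⟩,tP⟩, ⟨⟨m1,m2,m3,m4⟩,mX⟩ | ⟨⟨m1,m2,m3,m4⟩,mX⟩⟩ | ⟨⟨t1,t2,t3,t4⟩,tP⟩ | ⟨⟨⟨t1,t2,t3,t4⟩,tP⟩, ⟨⟨m1,m2,m3,m4⟩,mX⟩ | ⟨⟨m1,m2,m3,m4⟩,mX⟩⟩ | ⟨⟨⟨t1,t2,t3,t4⟩,tP⟩,⟨⟨m1,m2,m3,m4⟩,mX⟩⟩)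
    · exact Or.inl (⟨⟨m1,m2,m3,m4,mX⟩, Or.inr (Or.inl (⟨t1,t2,t3,t4,tP⟩))⟩)
    · exact Or.inl (⟨⟨m1,m2,m3,m4,mX⟩, Or.inr (Or.inr (Or.inl (⟨t1,t2,t3,t4,tP⟩)))⟩)
    · exact Or.inr (Or.inl (⟨⟨m1,m2,m3,m4,mX⟩, Or.inr (Or.inl (⟨t1,t2,t3,t4,tP⟩))⟩))
    · exact Or.inl (⟨⟨t1,t2,t3,t4,hPX tP⟩, Or.inl tP⟩)
    · exact Or.inl (⟨⟨m1,m2,m3,m4,mX⟩, Or.inr (Or.inr (Or.inr (⟨t1,t2,t3,t4,tP⟩)))⟩)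
    · exact Or.inr (Or.inr (Or.inr (⟨⟨m1,m2,m3,m4,mX⟩, Or.inr (Or.inl (⟨t1,t2,t3,t4,tP⟩))⟩)))
    · exact Or.inr (Or.inl (⟨⟨m1,m2,m3,m4,mX⟩, Or.inr (Or.inr (Or.inl (⟨t1,t2,t3,t4,tP⟩)))⟩))
    · exact Or.inr (Or.inl (⟨⟨t1,t2,t3,t4,hPX tP⟩, Or.inl tP⟩))
    · exact Or.inr (Or.inr (Or.inr (⟨⟨t1,t2,t3,t4,hPX tP⟩, Or.inl tP⟩)))
    · exact Or.inr (Or.inr (Or.inr (⟨⟨m1,m2,m3,m4,mX⟩, Or.inr (Or.inr (Or.inr (⟨t1,t2,t3,t4,tP⟩)))⟩)))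
    · exact Or.inr (Or.inr (Or.inl (⟨⟨m1,m2,m3,m4,mX⟩, Or.inr (Or.inl (⟨t1,t2,t3,t4,tP⟩))⟩)))
    · exact Or.inr (Or.inl (⟨⟨m1,m2,m3,m4,mX⟩, Or.inr (Or.inr (Or.inr (⟨t1,t2,t3,t4,tP⟩)))⟩))
    · exact Or.inr (Or.inr (Or.inl (⟨⟨t1,t2,t3,t4,hPX tP⟩, Or.inl tP⟩)))
    · exact Or.inr (Or.inr (Or.inl (⟨⟨m1,m2,m3,m4,mX⟩, Or.inr (Or.inr (Or.inr (⟨t1,t2,t3,t4,tP⟩)))⟩)))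
    · exact Or.inr (Or.inr (Or.inr (⟨⟨m1,m2,m3,m4,mX⟩, Or.inr (Or.inr (Or.inl (⟨t1,t2,t3,t4,tP⟩)))⟩)))
    · exact Or.inr (Or.inr (Or.inl (⟨⟨m1,m2,m3,m4,mX⟩, Or.inr (Or.inr (Or.inl (⟨t1,t2,t3,t4,tP⟩)))⟩)))

-- ===== VERDICT (by name: the statement is the Claim_ definition above) =====
theorem isThereP_spec : Claim_equal_isThereP := by
  intro x y tmp _ _
  unfold Spec_isThereP
  exact isThereP_eq_alt x y tmp
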